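-- pv_equiv track=rewrite | github.com/febertan/febertan | HF_2024_11_27_fg.py | hatodik_fg
-- ===== SOURCE A (Python) =====
-- def hatodik_fg(szam):
--     kobgyok = 0
--
--     if szam < 0:
--         szam *= -1
--
--     while kobgyok <= szam:
--         if szam == kobgyok ** 3:
--             return True
--
--         kobgyok += 1
--
--     else:
--         return False
-- ===== SOURCE B (Python) =====
-- def hatodik_fg(szam):
--     n = -szam if szam < 0 else szam
--     lo, hi = 0, n
--     while lo <= hi:
--         mid = (lo + hi) // 2
--         c = mid ** 3
--         if c == n:
--             return True
--         if c < n: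
--             lo = mid + 1
--         else:
--             hi = mid - 1
--     return False
-- ===== Notes on version B (the rewrite author's own statement) =====
-- stated objective: faster
-- what changed: replaces the linear scan of every candidate root 0..|n| by a binary search for the integer cube root on [0,|n|], verifying the cube at the midpoint
import Mathlib
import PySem

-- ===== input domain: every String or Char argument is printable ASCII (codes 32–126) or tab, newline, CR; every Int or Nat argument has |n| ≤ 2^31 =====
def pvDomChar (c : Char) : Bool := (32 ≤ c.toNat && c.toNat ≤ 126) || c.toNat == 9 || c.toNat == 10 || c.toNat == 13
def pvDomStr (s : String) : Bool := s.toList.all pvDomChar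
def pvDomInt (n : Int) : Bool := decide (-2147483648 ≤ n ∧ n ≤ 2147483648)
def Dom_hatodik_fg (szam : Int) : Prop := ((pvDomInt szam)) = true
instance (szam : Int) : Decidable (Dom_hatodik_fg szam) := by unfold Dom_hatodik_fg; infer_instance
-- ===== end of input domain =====

-- B replaces A's linear scan over all candidate roots 0..|n| by a binary search
-- for the integer cube root on [0,|n|] (objective: faster, asymptotic).

-- ===== PORT A =====
-- the 'while kobgyok <= szam' loop of A
def hatodikLoopA (szam kobgyok : Int) : Bool :=
  if h : kobgyok ≤ szam then
    if szam == kobgyok ^ 3 then true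
    else hatodikLoopA szam (kobgyok + 1)
  else false
termination_by (szam - kobgyok + 1).toNat
decreasing_by simp_wf; omega

def hatodik_fg (szam : Int) : Bool :=
  let szam := if szam < 0 then szam * -1 else szam
  hatodikLoopA szam 0

-- ===== PORT B =====
-- the 'while lo <= hi' binary-search loop of B
def hatodikLoopB (n lo hi : Int) : Bool :=
  if h : lo ≤ hi then
    let mid := PySem.Int.floordiv (lo + hi) 2
    let c := mid ^ 3
    if c == n then true
    else if c < n then hatodikLoopB n (mid + 1) hi
    else hatodikLoopB n lo (mid - 1)
  else false
termination_by (hi - lo + 1).toNat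
decreasing_by
  all_goals simp_wf
  all_goals have := PySem.Int.floordiv_two_mid_bounds h
  all_goals omega

def hatodik_fg_alt (szam : Int) : Bool :=
  let n := if szam < 0 then -szam else szam
  hatodikLoopB n 0 n

-- ===== PRECONDITION & SPEC =====
def Spec_hatodik_fg (szam : Int) (out : Bool) : Prop := out = hatodik_fg_alt szam
instance (szam : Int) (out : Bool) : Decidable (Spec_hatodik_fg szam out) := by unfold Spec_hatodik_fg; infer_instance

-- ===== CLAIM (what is proved, stated in full; the proofs are below) =====
def Claim_equal_hatodik_fg : Prop := ∀ (szam : Int), Dom_hatodik_fg szam → Spec_hatodik_fg szam (hatodik_fg szam)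

-- ===== LEMMAS AND PROOFS =====

theorem cube_le_cube {a b : Int} (h : a ≤ b) : a ^ 3 ≤ b ^ 3 := by
  nlinarith [sq_nonneg (a + b), sq_nonneg (a - b), sq_nonneg a, sq_nonneg b]

theorem cube_lt_of_cube_lt {a b : Int} (h : a ^ 3 < b ^ 3) : a < b := by
  by_contra hc
  exact absurd (cube_le_cube (by omega : b ≤ a)) (by omega)

-- A's loop returns true iff some r in [kobgyok, szam] cubes to szam
theorem loopA_true_iff (szam kobgyok : Int) :
    hatodikLoopA szam kobgyok = true ↔ ∃ r, kobgyok ≤ r ∧ r ≤ szam ∧ r ^ 3 = szam := by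
  fun_induction hatodikLoopA szam kobgyok with
  | case1 =>
    rename_i k h heq
    exact iff_of_true rfl ⟨k, le_refl _, h, (eq_of_beq heq).symm⟩
  | case2 =>
    rename_i k h heq ih
    have hne : szam ≠ k ^ 3 := fun e => heq (beq_iff_eq.mpr e)
    rw [ih]
    constructor
    · rintro ⟨r, h1, h2, h3⟩; exact ⟨r, by omega, h2, h3⟩
    · rintro ⟨r, h1, h2, h3⟩
      refine ⟨r, ?_, h2, h3⟩
      rcases eq_or_lt_of_le h1 with rfl | h1
      · exact absurd h3.symm hne
      · omega
  | case3 =>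
    rename_i k h
    exact iff_of_false (by simp) (by rintro ⟨r, h1, h2, _⟩; omega)

-- B's loop returns true iff some r in [lo, hi] cubes to n
theorem loopB_true_iff (n lo hi : Int) :
    hatodikLoopB n lo hi = true ↔ ∃ r, lo ≤ r ∧ r ≤ hi ∧ r ^ 3 = n := by
  fun_induction hatodikLoopB n lo hi with
  | case1 =>
    rename_i lo hi h mid c heq
    have hm : lo ≤ mid ∧ mid ≤ hi := PySem.Int.floordiv_two_mid_bounds h
    have hc : mid ^ 3 = n := eq_of_beq heq
    exact iff_of_true rfl ⟨mid, hm.1, hm.2, hc⟩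
  | case2 =>
    rename_i lo hi h mid c heq hlt ih
    have hm : lo ≤ mid ∧ mid ≤ hi := PySem.Int.floordiv_two_mid_bounds h
    have hlt' : mid ^ 3 < n := hlt
    rw [ih]
    constructor
    · rintro ⟨r, h1, h2, h3⟩; exact ⟨r, by omega, h2, h3⟩
    · rintro ⟨r, h1, h2, h3⟩
      refine ⟨r, ?_, h2, h3⟩
      have : mid < r := cube_lt_of_cube_lt (by rw [h3]; exact hlt')
      omega
  | case3 =>
    rename_i lo hi h mid c heq hge ih
    have hm : lo ≤ mid ∧ mid ≤ hi := PySem.Int.floordiv_two_mid_bounds h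
    have hne : mid ^ 3 ≠ n := fun e => heq (beq_iff_eq.mpr e)
    have hge' : ¬ mid ^ 3 < n := hge
    rw [ih]
    constructor
    · rintro ⟨r, h1, h2, h3⟩; exact ⟨r, h1, by omega, h3⟩
    · rintro ⟨r, h1, h2, h3⟩
      refine ⟨r, h1, ?_, h3⟩
      have : r < mid := cube_lt_of_cube_lt (by rw [h3]; omega)
      omega
  | case4 =>
    rename_i lo hi h
    exact iff_of_false (by simp) (by rintro ⟨r, h1, h2, _⟩; omega)

-- ===== VERDICT (by name: the statement is the Claim_ definition above) =====
theorem hatodik_fg_spec : Claim_equal_hatodik_fg := by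
  intro szam _
  unfold Spec_hatodik_fg hatodik_fg hatodik_fg_alt
  have habs : (if szam < 0 then szam * -1 else szam) = (if szam < 0 then -szam else szam) := by
    split <;> ring
  rw [habs, Bool.eq_iff_iff, loopA_true_iff, loopB_true_iff]
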